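-- pv_equiv track=rewrite | github.com/appu554/cardiofit_2026 | backend/shared-infrastructure/knowledge-base-services/shared/extraction/v4/channel_d_table.py | _find_cell_offset
-- ===== SOURCE A (Python) =====
-- def _find_cell_offset(
--     line: str, cell_text: str, col_idx: int
-- ) -> int:
--     """Find the character offset of a cell's text within its table line."""
--     pos = 0
--     col = -1
--
--     for i, char in enumerate(line):
--         if char == '|':
--             col += 1
--             if col == col_idx + 1:
--                 segment = line[pos:i]
--                 idx = segment.find(cell_text)
--                 if idx >= 0:
--                     return pos + idx
--             pos = i + 1
--
--     idx = line.find(cell_text)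
--     return idx if idx >= 0 else 0
-- ===== SOURCE B (Python) =====
-- def _find_cell_offset(line, cell_text, col_idx):
--     """Find the character offset of a cell's text within its table line."""
--     parts = line.split('|')
--     target = col_idx + 1
--     if 0 <= target < len(parts) - 1:
--         offset = sum(len(p) for p in parts[:target]) + target
--         idx = parts[target].find(cell_text)
--         if idx >= 0:
--             return offset + idx
--     idx = line.find(cell_text)
--     return idx if idx >= 0 else 0
-- ===== Notes on version B (the rewrite author's own statement) =====
-- stated objective: faster
-- what changed: Replaces the manual character-by-character pipe-scanning loop with index bookkeeping by a single line.split('|') plus direct arithmetic on the part lengths to locate the target cell's segment.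
import Mathlib
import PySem

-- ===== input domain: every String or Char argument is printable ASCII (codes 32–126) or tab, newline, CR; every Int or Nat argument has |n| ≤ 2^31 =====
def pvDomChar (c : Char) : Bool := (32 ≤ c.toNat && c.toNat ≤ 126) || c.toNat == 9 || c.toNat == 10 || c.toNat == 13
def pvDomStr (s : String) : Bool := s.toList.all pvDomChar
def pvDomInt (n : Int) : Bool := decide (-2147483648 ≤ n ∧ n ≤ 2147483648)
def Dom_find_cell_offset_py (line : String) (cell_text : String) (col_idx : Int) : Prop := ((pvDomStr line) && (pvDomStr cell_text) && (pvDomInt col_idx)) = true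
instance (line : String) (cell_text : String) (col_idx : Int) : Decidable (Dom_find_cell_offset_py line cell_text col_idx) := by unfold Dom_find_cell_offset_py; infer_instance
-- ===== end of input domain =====

-- B replaces A's character-by-character pipe-scanning loop by line.split('|') plus
-- arithmetic on the part lengths (same return value; measured constant-factor faster).

-- ===== PORT A =====
-- the 'for i, char in enumerate(line)' loop of A, with its state (pos, col); 'some r' = early return
def pvA_loop (cell : List Char) (target : Int) (cs : List Char) :
    List (Int × Char) → Int → Int → Option Int
  | [], _, _ => none
  | (i, c) :: rest, pos, col =>
    if c = '|' then
      let col' := col + 1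
      if col' = target then
        let segment := PySem.List.slice cs (some pos) (some i)
        let idx := PySem.Chars.find segment cell
        if 0 ≤ idx then some (pos + idx)
        else pvA_loop cell target cs rest (i + 1) col'
      else pvA_loop cell target cs rest (i + 1) col'
    else pvA_loop cell target cs rest pos col

def find_cell_offset_py (line : String) (cell_text : String) (col_idx : Int) : Int :=
  let cs := line.toList
  match pvA_loop cell_text.toList (col_idx + 1) cs (PySem.List.enumerate cs 0) 0 (-1) with
  | some r => r
  | none =>
      let idx := PySem.Chars.find cs cell_text.toList
      if 0 ≤ idx then idx else 0

-- ===== PORT B =====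
-- line.split('|') with a one-character separator is List.splitOn '|' on the code points
def find_cell_offset_py_alt (line : String) (cell_text : String) (col_idx : Int) : Int :=
  let cs := line.toList
  let parts := cs.splitOn '|'
  let target := col_idx + 1
  if 0 ≤ target ∧ target < (parts.length : Int) - 1 then
    let offset : Int := ((parts.take target.toNat).map (fun p => (p.length : Int))).sum + target
    let idx := PySem.Chars.find (parts.getD target.toNat []) cell_text.toList
    if 0 ≤ idx then offset + idx
    else
      let idx2 := PySem.Chars.find cs cell_text.toList
      if 0 ≤ idx2 then idx2 else 0
  else
    let idx2 := PySem.Chars.find cs cell_text.toList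
    if 0 ≤ idx2 then idx2 else 0

-- ===== PRECONDITION & SPEC =====
def Spec_find_cell_offset_py (line : String) (cell_text : String) (col_idx : Int) (out : Int) : Prop := out = find_cell_offset_py_alt line cell_text col_idx
instance (line : String) (cell_text : String) (col_idx : Int) (out : Int) : Decidable (Spec_find_cell_offset_py line cell_text col_idx out) := by unfold Spec_find_cell_offset_py; infer_instance

-- ===== CLAIM (what is proved, stated in full; the proofs are below) =====
def Claim_equal_find_cell_offset_py : Prop := ∀ (line : String) (cell_text : String) (col_idx : Int), Dom_find_cell_offset_py line cell_text col_idx → Spec_find_cell_offset_py line cell_text col_idx (find_cell_offset_py line cell_text col_idx)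

-- ===== LEMMAS AND PROOFS =====

-- every piece of splitOn is separator-free
lemma pv_splitOn_no_sep {α : Type} [DecidableEq α] (x : α) (cs : List α) :
    ∀ p ∈ cs.splitOn x, x ∉ p := by
  rw [List.splitOn]
  induction cs with
  | nil => simp [List.splitOnP_nil]
  | cons a as ih =>
    rw [List.splitOnP_cons]
    by_cases h : a = x
    · simp [h]; exact ih
    · simp [h]
      cases hsp : as.splitOnP (· == x) with
      | nil => simp
      | cons q qs =>
        simp
        refine ⟨⟨fun h1 => h h1.symm, ?_⟩, ?_⟩
        · exact (ih q (by rw [hsp]; exact .head _))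
        · intro p hp; exact ih p (by rw [hsp]; exact .tail _ hp)

lemma pv_splitOn_ne_nil {α : Type} [DecidableEq α] (x : α) (cs : List α) :
    cs.splitOn x ≠ [] := by
  simp [List.splitOn, List.splitOnP_ne_nil]

lemma pv_intercalate_cons₂ (p q : List Char) (rest : List (List Char)) :
    List.intercalate ['|'] (p :: q :: rest) = p ++ '|' :: List.intercalate ['|'] (q :: rest) := by
  simp [List.intercalate, List.intersperse]

lemma pv_intercalate_single (p : List Char) : List.intercalate ['|'] [p] = p := by
  simp [List.intercalate]

-- a pipe-free stretch of characters leaves the loop state untouched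
lemma pvA_loop_skip (cell : List Char) (target : Int) (cs : List Char)
    (xs : List Char) (hxs : '|' ∉ xs) :
    ∀ (s : Int) (L : List (Int × Char)) (pos col : Int),
      pvA_loop cell target cs (PySem.List.enumerate xs s ++ L) pos col
        = pvA_loop cell target cs L pos col := by
  induction xs with
  | nil => simp [PySem.List.enumerate_nil]
  | cons a as ih =>
    intro s L pos col
    rw [PySem.List.enumerate_cons]
    have ha : ¬ a = '|' := fun h => hxs (h ▸ List.mem_cons_self)
    simp only [List.cons_append, pvA_loop, if_neg ha]
    exact ih (fun h => hxs (List.mem_cons_of_mem _ h)) _ _ _ _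

-- characterisation of A's loop over the decomposition of the line into pipe-free parts
lemma pvA_loop_main (cell : List Char) (target : Int) :
    ∀ (ps : List (List Char)) (pre : List Char) (col : Int),
      ps ≠ [] → (∀ p ∈ ps, '|' ∉ p) →
      pvA_loop cell target (pre ++ List.intercalate ['|'] ps)
          (PySem.List.enumerate (List.intercalate ['|'] ps) (pre.length : Int))
          (pre.length : Int) col
        = if 0 ≤ target - (col + 1) ∧ target - (col + 1) < (ps.length : Int) - 1 then
            (let k := (target - (col + 1)).toNat
             let idx := PySem.Chars.find (ps.getD k []) cell
             if 0 ≤ idx then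
               some ((pre.length : Int) + ((ps.take k).map (fun p => (p.length : Int))).sum + k + idx)
             else none)
          else none := by
  intro ps
  induction ps with
  | nil => intro _ _ h; exact absurd rfl h
  | cons p qs ih =>
    intro pre col _ hfree
    cases qs with
    | nil =>
      rw [pv_intercalate_single]
      rw [show PySem.List.enumerate p (pre.length : Int)
            = PySem.List.enumerate p (pre.length : Int) ++ [] from (List.append_nil _).symm]
      rw [pvA_loop_skip cell target _ p (hfree p List.mem_cons_self)]
      simp [pvA_loop]
    | cons q rest =>
      rw [pv_intercalate_cons₂]
      rw [show p ++ '|' :: List.intercalate ['|'] (q :: rest)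
            = p ++ ['|'] ++ List.intercalate ['|'] (q :: rest) by simp]
      rw [PySem.List.enumerate_append, PySem.List.enumerate_append, PySem.List.enumerate_cons,
          PySem.List.enumerate_nil]
      simp only [List.append_assoc, List.singleton_append]
      rw [pvA_loop_skip cell target _ p (hfree p List.mem_cons_self)]
      simp only [pvA_loop, reduceIte]
      have hsl : PySem.List.slice (pre ++ (p ++ '|' :: List.intercalate ['|'] (q :: rest)))
          (some (pre.length : Int)) (some ((pre.length : Int) + (p.length : Int))) = p := by
        rw [PySem.List.slice_natCast_add, List.drop_left, List.take_left]
      rw [hsl]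
      have e1 : pre ++ (p ++ '|' :: List.intercalate ['|'] (q :: rest))
          = (pre ++ p ++ ['|']) ++ List.intercalate ['|'] (q :: rest) := by simp
      have e2 : ((pre.length : Int) + ((p ++ ['|']).length : Int))
          = (((pre ++ p ++ ['|']).length : Int)) := by simp
      have e3 : ((pre.length : Int) + (p.length : Int) + 1)
          = (((pre ++ p ++ ['|']).length : Int)) := by simp; ring
      rw [e1, e2, e3]
      rw [ih (pre ++ p ++ ['|']) (col + 1) (by simp)
          (fun r hr => hfree r (List.mem_cons_of_mem _ hr))]
      simp only [List.length_cons]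
      push_cast
      by_cases hct : col + 1 = target
      · rw [if_pos hct]
        have hk : (target - (col + 1)).toNat = 0 := by omega
        by_cases hidx : 0 ≤ PySem.Chars.find p cell
        · rw [if_pos hidx, if_pos (by constructor <;> omega)]
          simp [hk, hidx]
        · rw [if_neg hidx, if_neg (by omega), if_pos (by constructor <;> omega)]
          simp [hk, hidx]
      · rw [if_neg hct]
        by_cases hcond : 0 ≤ target - (col + 1 + 1) ∧
            target - (col + 1 + 1) < ((rest.length : Int) + 1) - 1
        · rw [if_pos hcond]
          have hk : (target - (col + 1)).toNat = (target - (col + 1 + 1)).toNat + 1 := by omega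
          rw [hk]
          simp only [List.getD_cons_succ, List.take_succ_cons, List.map_cons, List.sum_cons]
          split_ifs with h1 h2
          · congr 1
            simp only [List.length_append, List.length_cons, List.length_nil]
            push_cast
            ring
          · omega
          · rfl
          · rfl
        · rw [if_neg hcond, if_neg (by omega)]
  
theorem pv_main (line cell_text : String) (col_idx : Int) :
    find_cell_offset_py line cell_text col_idx = find_cell_offset_py_alt line cell_text col_idx := by
  unfold find_cell_offset_py find_cell_offset_py_alt
  have h := pvA_loop_main cell_text.toList (col_idx + 1) (line.toList.splitOn '|') [] (-1)
    (pv_splitOn_ne_nil '|' line.toList) (pv_splitOn_no_sep '|' line.toList)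
  rw [List.intercalate_splitOn line.toList '|'] at h
  norm_num at h
  simp only [List.getD_eq_getElem?_getD]
  rw [h]
  split_ifs <;> simp only [List.map_take] <;> omega

-- ===== VERDICT (by name: the statement is the Claim_ definition above) =====
theorem find_cell_offset_py_spec : Claim_equal_find_cell_offset_py := by
  intro line cell_text col_idx _
  exact pv_main line cell_text col_idx
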